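-- pv_equiv track=rewrite | github.com/EnvGen/Degprimer_specificity | src/parse_genomes.py | Genome_counter
-- ===== SOURCE A (Python) =====
-- def Genome_counter(hits):
--     Genus_species_strains = {}
--     for s in hits:
--         gns = s.split("_")[2]
--         sp = s.split("_")[3]
--         strn = "_".join(s.split("_")[4:])
--
--         if gns in Genus_species_strains:
--             if sp in Genus_species_strains[gns].keys():
--                 if strn in Genus_species_strains[gns][sp].keys():
--                     Genus_species_strains[gns][sp][strn] += 1
--                 else:
--                     Genus_species_strains[gns][sp][strn] = 1
--             else:
--                 Genus_species_strains[gns][sp] = {strn: 1}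
--         else:
--             Genus_species_strains[gns] = {sp: {strn: 1}}
--
--     return Genus_species_strains
-- ===== SOURCE B (Python) =====
-- def _key(s):
--     p = s.split("_")
--     return (p[2], p[3], "_".join(p[4:]))
--
-- def _strain_counts(ks, g, sp):
--     sts = list(dict.fromkeys(k[2] for k in ks if k[0] == g and k[1] == sp))
--     return {st: ks.count((g, sp, st)) for st in sts}
--
-- def _species_map(ks, g):
--     sps = list(dict.fromkeys(k[1] for k in ks if k[0] == g))
--     return {sp: _strain_counts(ks, g, sp) for sp in sps}
--
-- def Genome_counter(hits):
--     ks = [_key(s) for s in hits]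
--     gs = list(dict.fromkeys(k[0] for k in ks))
--     return {g: _species_map(ks, g) for g in gs}
-- ===== Notes on version B (the rewrite author's own statement) =====
-- stated objective: alternative
-- what changed: A threads one mutable nested dict through a single loop with three-way membership branching; B instead extracts the (genus, species, strain) key list once and builds the nested dict declaratively by ordered dedup of keys at each level with ks.count for the leaf counts - no incremental dict updates at all.
import Mathlib
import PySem

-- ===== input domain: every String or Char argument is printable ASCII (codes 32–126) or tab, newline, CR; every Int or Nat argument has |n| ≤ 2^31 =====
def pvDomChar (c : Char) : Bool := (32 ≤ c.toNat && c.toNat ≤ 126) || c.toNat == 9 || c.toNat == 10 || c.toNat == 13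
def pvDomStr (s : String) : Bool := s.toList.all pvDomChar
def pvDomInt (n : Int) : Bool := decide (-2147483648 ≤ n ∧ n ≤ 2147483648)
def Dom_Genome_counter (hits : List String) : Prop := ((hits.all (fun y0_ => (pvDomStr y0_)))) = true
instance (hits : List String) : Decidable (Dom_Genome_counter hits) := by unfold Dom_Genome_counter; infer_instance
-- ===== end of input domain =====

-- B is an alternative decomposition: extract the (genus, species, strain) key list once, then build the
-- nested result declaratively by ordered dedup at each level with count at the leaves (no incremental updates).

-- shared key extraction: s.split("_") (sep nonempty, so split? never returns none), p[2], p[3], "_".join(p[4:])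
def pvSplit (s : String) : List String := (PySem.Str.split? s "_").getD []

def pvKey (s : String) : String × String × String :=
  (PySem.List.pyGetD (pvSplit s) 2 "", PySem.List.pyGetD (pvSplit s) 3 "",
   PySem.Str.join "_" (PySem.List.slice (pvSplit s) (some 4) none))

-- ===== PORT A =====
-- one iteration of A's loop: three-way membership branching on a nested dict
def GCstep (d : PySem.Dict String (PySem.Dict String (PySem.Dict String Int))) (s : String) :
    PySem.Dict String (PySem.Dict String (PySem.Dict String Int)) :=
  let gns := PySem.List.pyGetD (pvSplit s) 2 ""
  let sp := PySem.List.pyGetD (pvSplit s) 3 ""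
  let strn := PySem.Str.join "_" (PySem.List.slice (pvSplit s) (some 4) none)
  if d.contains gns then
    let dg := d.getD gns PySem.Dict.empty
    if dg.contains sp then
      let dgs := dg.getD sp PySem.Dict.empty
      if dgs.contains strn then
        d.insert gns (dg.insert sp (dgs.insert strn (dgs.getD strn 0 + 1)))
      else
        d.insert gns (dg.insert sp (dgs.insert strn 1))
    else
      d.insert gns (dg.insert sp (PySem.Dict.ofList [(strn, (1 : Int))]))
  else
    d.insert gns (PySem.Dict.ofList [(sp, PySem.Dict.ofList [(strn, (1 : Int))])])

def Genome_counter (hits : List String) : List (String × List (String × List (String × Int))) :=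
  (hits.foldl GCstep PySem.Dict.empty).items.map (fun p => (p.1, p.2.items.map (fun q => (q.1, q.2.items))))

-- ===== PORT B =====
def stList (ks : List (String × String × String)) (g sp : String) : List (String × Int) :=
  (PySem.List.dedup ((ks.filter (fun k => k.1 == g && k.2.1 == sp)).map (fun k => k.2.2))).map
    (fun st => (st, (ks.count (g, sp, st) : Int)))

def spList (ks : List (String × String × String)) (g : String) : List (String × List (String × Int)) :=
  (PySem.List.dedup ((ks.filter (fun k => k.1 == g)).map (fun k => k.2.1))).map
    (fun sp => (sp, stList ks g sp))

def pvCanon (ks : List (String × String × String)) : List (String × List (String × List (String × Int))) :=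
  (PySem.List.dedup (ks.map (fun k => k.1))).map (fun g => (g, spList ks g))

def Genome_counter_alt (hits : List String) : List (String × List (String × List (String × Int))) :=
  pvCanon (hits.map pvKey)

-- ===== PRECONDITION & SPEC =====
-- Pre_ excludes exactly the hits on which Python A raises IndexError: strings whose '_'-split has
-- fewer than 4 fields (s.split("_")[2] / [3] out of range).
def Pre_Genome_counter (hits : List String) : Prop := ∀ s ∈ hits, 4 ≤ (pvSplit s).length
instance (hits : List String) : Decidable (Pre_Genome_counter hits) := by unfold Pre_Genome_counter; infer_instance

def pvWitness_Genome_counter : List String := ["g1_x_Gen_sp_st_1", "g2_x_Gen_sp_st_1", "g3_x_Gen_spB_"]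

def Spec_Genome_counter (hits : List String) (out : List (String × List (String × List (String × Int)))) : Prop := out = Genome_counter_alt hits
instance (hits : List String) (out : List (String × List (String × List (String × Int)))) : Decidable (Spec_Genome_counter hits out) := by unfold Spec_Genome_counter; infer_instance

-- ===== CLAIM (what is proved, stated in full; the proofs are below) =====
def Claim_equal_Genome_counter : Prop := ∀ (hits : List String), Dom_Genome_counter hits → Pre_Genome_counter hits → Spec_Genome_counter hits (Genome_counter hits)

-- ===== LEMMAS AND PROOFS =====

def conv2 (d : PySem.Dict String (PySem.Dict String Int)) : List (String × List (String × Int)) :=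
  d.items.map (fun q => (q.1, q.2.items))

def conv1 (d : PySem.Dict String (PySem.Dict String (PySem.Dict String Int))) :
    List (String × List (String × List (String × Int))) :=
  d.items.map (fun p => (p.1, conv2 p.2))

def stepK (d : PySem.Dict String (PySem.Dict String (PySem.Dict String Int)))
    (k : String × String × String) : PySem.Dict String (PySem.Dict String (PySem.Dict String Int)) :=
  if d.contains k.1 then
    let dg := d.getD k.1 PySem.Dict.empty
    if dg.contains k.2.1 then
      let dgs := dg.getD k.2.1 PySem.Dict.empty
      if dgs.contains k.2.2 then
        d.insert k.1 (dg.insert k.2.1 (dgs.insert k.2.2 (dgs.getD k.2.2 0 + 1)))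
      else
        d.insert k.1 (dg.insert k.2.1 (dgs.insert k.2.2 1))
    else
      d.insert k.1 (dg.insert k.2.1 (PySem.Dict.ofList [(k.2.2, (1 : Int))]))
  else
    d.insert k.1 (PySem.Dict.ofList [(k.2.1, PySem.Dict.ofList [(k.2.2, (1 : Int))])])

theorem count_snoc (l : List (String × String × String)) (k v : String × String × String) :
    (l ++ [k]).count v = l.count v + (if k = v then 1 else 0) := by
  by_cases h : k = v <;> simp [List.count_append, h]

theorem dedup_snoc {α : Type} [BEq α] [LawfulBEq α] (xs : List α) (x : α) :
    PySem.List.dedup (xs ++ [x]) =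
      if x ∈ xs then PySem.List.dedup xs else PySem.List.dedup xs ++ [x] := by
  have h := PySem.Set.ofList_append xs [x]
  simp only [PySem.List.dedup, h, PySem.Set.update, List.foldl_cons, List.foldl_nil, PySem.Set.add]
  by_cases hx : x ∈ xs
  · simp [hx, PySem.Set.mem_ofList]
  · simp [hx, PySem.Set.mem_ofList]

theorem stList_stable (l : List (String × String × String)) (k : String × String × String)
    (g sp : String) (h : ¬ (k.1 = g ∧ k.2.1 = sp)) :
    stList (l ++ [k]) g sp = stList l g sp := by
  have hf : (k.1 == g && k.2.1 == sp) = false := by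
    simp only [Bool.and_eq_false_iff, beq_eq_false_iff_ne, ne_eq]; tauto
  unfold stList
  rw [List.filter_append]
  simp only [List.filter_cons, hf, Bool.false_eq_true, if_false, List.filter_nil, List.append_nil]
  apply List.map_congr_left
  intro st _
  rw [count_snoc]
  have : k ≠ (g, sp, st) := by
    intro he; apply h; rw [he]; exact ⟨rfl, rfl⟩
  simp [this]

theorem spList_stable (l : List (String × String × String)) (k : String × String × String)
    (g : String) (h : k.1 ≠ g) :
    spList (l ++ [k]) g = spList l g := by
  have hf : (k.1 == g) = false := by simpa using h
  unfold spList
  rw [List.filter_append]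
  simp only [List.filter_cons, hf, Bool.false_eq_true, if_false, List.filter_nil, List.append_nil]
  apply List.map_congr_left
  intro sp _
  rw [stList_stable l k g sp (by tauto)]

theorem stList_hit_new (l : List (String × String × String)) (k : String × String × String)
    (h : k.2.2 ∉ (l.filter (fun k' => k'.1 == k.1 && k'.2.1 == k.2.1)).map (fun k' => k'.2.2)) :
    stList (l ++ [k]) k.1 k.2.1 = stList l k.1 k.2.1 ++ [(k.2.2, 1)] := by
  have hcz : l.count (k.1, k.2.1, k.2.2) = 0 := by
    rw [List.count_eq_zero]
    intro hm
    exact h (List.mem_map.mpr ⟨(k.1, k.2.1, k.2.2), List.mem_filter.mpr ⟨hm, by simp⟩, rfl⟩)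
  unfold stList
  rw [List.filter_append]
  simp only [List.filter_cons, List.filter_nil, beq_self_eq_true, Bool.and_self, if_true]
  rw [List.map_append]
  simp only [List.map_cons, List.map_nil]
  rw [dedup_snoc, if_neg h, List.map_append]
  congr 1
  · apply List.map_congr_left
    intro st hst
    rw [count_snoc]
    have hne : k ≠ (k.1, k.2.1, st) := by
      intro he
      apply h
      have hmem : st ∈ (l.filter (fun k' => k'.1 == k.1 && k'.2.1 == k.2.1)).map (fun k' => k'.2.2) :=
        (PySem.List.mem_dedup _ _).mp hst
      rw [← show k.2.2 = st from congrArg (fun p => p.2.2) he] at hmem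
      exact hmem
    simp [hne]
  · simp only [List.map_cons, List.map_nil]
    rw [count_snoc]
    have hk : k = (k.1, k.2.1, k.2.2) := rfl
    simp [← hk, hcz]

theorem stList_hit_old (l : List (String × String × String)) (k : String × String × String)
    (h : k.2.2 ∈ (l.filter (fun k' => k'.1 == k.1 && k'.2.1 == k.2.1)).map (fun k' => k'.2.2)) :
    stList (l ++ [k]) k.1 k.2.1 =
      (stList l k.1 k.2.1).map (fun p => if p.1 == k.2.2 then (p.1, p.2 + 1) else p) := by
  unfold stList
  rw [List.filter_append]
  simp only [List.filter_cons, List.filter_nil, beq_self_eq_true, Bool.and_self, if_true]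
  rw [List.map_append]
  simp only [List.map_cons, List.map_nil]
  rw [dedup_snoc, if_pos h, List.map_map]
  apply List.map_congr_left
  intro st hst
  rw [count_snoc]
  by_cases hs : st = k.2.2
  · simp [hs]
  · have hne : k ≠ (k.1, k.2.1, st) := by
      intro he; exact hs (congrArg (fun p => p.2.2) he).symm
    simp [hne, hs]

theorem spList_hit_new (l : List (String × String × String)) (k : String × String × String)
    (h : k.2.1 ∉ (l.filter (fun k' => k'.1 == k.1)).map (fun k' => k'.2.1)) :
    spList (l ++ [k]) k.1 = spList l k.1 ++ [(k.2.1, [(k.2.2, 1)])] := by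
  have hfil : l.filter (fun k' => k'.1 == k.1 && k'.2.1 == k.2.1) = [] := by
    rw [List.filter_eq_nil_iff]
    intro k' hk' hb
    simp only [Bool.and_eq_true, beq_iff_eq] at hb
    exact h (List.mem_map.mpr ⟨k', List.mem_filter.mpr ⟨hk', by simp [hb.1]⟩, hb.2⟩)
  have hcz : l.count (k.1, k.2.1, k.2.2) = 0 := by
    rw [List.count_eq_zero]
    intro hm
    have hmem : (k.1, k.2.1, k.2.2) ∈ l.filter (fun k' => k'.1 == k.1 && k'.2.1 == k.2.1) :=
      List.mem_filter.mpr ⟨hm, by simp⟩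
    simp [hfil] at hmem
  unfold spList
  rw [List.filter_append]
  simp only [List.filter_cons, List.filter_nil, beq_self_eq_true, if_true]
  rw [List.map_append]
  simp only [List.map_cons, List.map_nil]
  rw [dedup_snoc, if_neg h, List.map_append]
  congr 1
  · apply List.map_congr_left
    intro sp hsp
    have hne : ¬ (k.1 = k.1 ∧ k.2.1 = sp) := by
      rintro ⟨-, h2⟩
      exact h (h2 ▸ (PySem.List.mem_dedup _ _).mp hsp)
    rw [stList_stable l k k.1 sp hne]
  · simp only [List.map_cons, List.map_nil]
    unfold stList
    rw [List.filter_append, hfil]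
    simp only [List.nil_append, List.filter_cons, List.filter_nil, beq_self_eq_true, Bool.and_self,
      if_true, List.map_cons, List.map_nil]
    have hd : PySem.List.dedup [k.2.2] = [k.2.2] := rfl
    rw [hd]
    simp only [List.map_cons, List.map_nil]
    rw [count_snoc]
    have hk : k = (k.1, k.2.1, k.2.2) := rfl
    simp [← hk, hcz]

theorem spList_hit_old (l : List (String × String × String)) (k : String × String × String)
    (h : k.2.1 ∈ (l.filter (fun k' => k'.1 == k.1)).map (fun k' => k'.2.1)) :
    spList (l ++ [k]) k.1 =
      (spList l k.1).map
        (fun p => if p.1 == k.2.1 then (p.1, stList (l ++ [k]) k.1 k.2.1) else p) := by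
  unfold spList
  rw [List.filter_append]
  simp only [List.filter_cons, List.filter_nil, beq_self_eq_true, if_true]
  rw [List.map_append]
  simp only [List.map_cons, List.map_nil]
  rw [dedup_snoc, if_pos h, List.map_map]
  apply List.map_congr_left
  intro sp hsp
  by_cases hs : sp = k.2.1
  · simp [hs]
  · rw [stList_stable l k k.1 sp (by tauto)]
    simp [hs]

theorem conv1_insert_of_contains (d : PySem.Dict String (PySem.Dict String (PySem.Dict String Int)))
    (g : String) (v : PySem.Dict String (PySem.Dict String Int)) (h : d.contains g = true) :
    conv1 (d.insert g v) = (conv1 d).map (fun p => if p.1 == g then (g, conv2 v) else p) := by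
  unfold conv1
  rw [PySem.Dict.items_insert_of_contains d v h, List.map_map, List.map_map]
  apply List.map_congr_left
  intro p _
  by_cases hp : p.1 = g <;> simp [hp]

theorem conv1_insert_of_not_contains (d : PySem.Dict String (PySem.Dict String (PySem.Dict String Int)))
    (g : String) (v : PySem.Dict String (PySem.Dict String Int)) (h : d.contains g = false) :
    conv1 (d.insert g v) = conv1 d ++ [(g, conv2 v)] := by
  unfold conv1
  rw [PySem.Dict.items_insert_of_not_contains d v h, List.map_append]
  rfl

theorem conv2_insert_of_contains (d : PySem.Dict String (PySem.Dict String Int))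
    (g : String) (v : PySem.Dict String Int) (h : d.contains g = true) :
    conv2 (d.insert g v) = (conv2 d).map (fun p => if p.1 == g then (g, v.items) else p) := by
  unfold conv2
  rw [PySem.Dict.items_insert_of_contains d v h, List.map_map, List.map_map]
  apply List.map_congr_left
  intro p _
  by_cases hp : p.1 = g <;> simp [hp]

theorem conv2_insert_of_not_contains (d : PySem.Dict String (PySem.Dict String Int))
    (g : String) (v : PySem.Dict String Int) (h : d.contains g = false) :
    conv2 (d.insert g v) = conv2 d ++ [(g, v.items)] := by
  unfold conv2
  rw [PySem.Dict.items_insert_of_not_contains d v h, List.map_append]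
  rfl

theorem main_inv (ks : List (String × String × String)) :
    conv1 (ks.foldl stepK PySem.Dict.empty) = pvCanon ks := by
  induction ks using List.reverseRecOn with
  | nil => rfl
  | append_singleton l k IH =>
    rw [List.foldl_append, List.foldl_cons, List.foldl_nil]
    set d := l.foldl stepK PySem.Dict.empty with hd
    -- extraction of structure from IH
    have hkeys : d.keys = PySem.List.dedup (l.map (fun k => k.1)) := by
      have h := congrArg (List.map Prod.fst) IH
      simpa [conv1, pvCanon, List.map_map, PySem.Dict.keys, Function.comp_def] using h
    have hnd : d.keys.Nodup := by rw [hkeys]; exact PySem.List.nodup_dedup _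
    have hconv : conv1 d =
        (PySem.List.dedup (l.map (fun k => k.1))).map
          (fun g => (g, conv2 (d.getD g PySem.Dict.empty))) := by
      unfold conv1
      rw [PySem.Dict.items_eq_map_keys d hnd PySem.Dict.empty, List.map_map, hkeys]
      rfl
    have hpt : ∀ g ∈ PySem.List.dedup (l.map (fun k => k.1)),
        conv2 (d.getD g PySem.Dict.empty) = spList l g := by
      have h2 := hconv.symm.trans IH
      unfold pvCanon at h2
      intro g hg
      have := List.map_inj_left.mp h2 g hg
      exact congrArg Prod.snd this
    by_cases hg : k.1 ∈ l.map (fun k => k.1)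
    · -- genus already present
      have hcont : d.contains k.1 = true := by
        rw [PySem.Dict.contains_eq_decide_mem_keys, hkeys]
        simp [hg]
      have hdg : conv2 (d.getD k.1 PySem.Dict.empty) = spList l k.1 :=
        hpt k.1 ((PySem.List.mem_dedup _ _).mpr hg)
      set dg := d.getD k.1 PySem.Dict.empty with hdgdef
      -- second level extraction
      have hkeys2 : dg.keys = PySem.List.dedup ((l.filter (fun k' => k'.1 == k.1)).map (fun k' => k'.2.1)) := by
        have h := congrArg (List.map Prod.fst) hdg
        simpa [conv2, spList, List.map_map, PySem.Dict.keys, Function.comp_def] using h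
      have hnd2 : dg.keys.Nodup := by rw [hkeys2]; exact PySem.List.nodup_dedup _
      have hconv2 : conv2 dg =
          (PySem.List.dedup ((l.filter (fun k' => k'.1 == k.1)).map (fun k' => k'.2.1))).map
            (fun sp => (sp, (dg.getD sp PySem.Dict.empty).items)) := by
        unfold conv2
        rw [PySem.Dict.items_eq_map_keys dg hnd2 PySem.Dict.empty, List.map_map, hkeys2]
        rfl
      have hpt2 : ∀ sp ∈ PySem.List.dedup ((l.filter (fun k' => k'.1 == k.1)).map (fun k' => k'.2.1)),
          (dg.getD sp PySem.Dict.empty).items = stList l k.1 sp := by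
        have h2 := hconv2.symm.trans hdg
        unfold spList at h2
        intro sp hsp
        have := List.map_inj_left.mp h2 sp hsp
        exact congrArg Prod.snd this
      -- common top-level rewriting of RHS
      have htop : pvCanon (l ++ [k]) =
          (PySem.List.dedup (l.map (fun k => k.1))).map
            (fun g => (g, spList (l ++ [k]) g)) := by
        unfold pvCanon
        rw [List.map_append]
        simp only [List.map_cons, List.map_nil]
        rw [dedup_snoc, if_pos hg]
      by_cases hsp : k.2.1 ∈ (l.filter (fun k' => k'.1 == k.1)).map (fun k' => k'.2.1)
      · -- species present
        have hcont2 : dg.contains k.2.1 = true := by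
          rw [PySem.Dict.contains_eq_decide_mem_keys, hkeys2]
          simp [hsp]
        have hdgs : (dg.getD k.2.1 PySem.Dict.empty).items = stList l k.1 k.2.1 :=
          hpt2 k.2.1 ((PySem.List.mem_dedup _ _).mpr hsp)
        set dgs := dg.getD k.2.1 PySem.Dict.empty with hdgsdef
        have hkeys3 : dgs.keys = PySem.List.dedup ((l.filter (fun k' => k'.1 == k.1 && k'.2.1 == k.2.1)).map (fun k' => k'.2.2)) := by
          have h := congrArg (List.map Prod.fst) hdgs
          simpa [stList, List.map_map, PySem.Dict.keys, Function.comp_def] using h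
        have hnd3 : dgs.keys.Nodup := by rw [hkeys3]; exact PySem.List.nodup_dedup _
        by_cases hst : k.2.2 ∈ (l.filter (fun k' => k'.1 == k.1 && k'.2.1 == k.2.1)).map (fun k' => k'.2.2)
        · -- strain present: increment
          have hcont3 : dgs.contains k.2.2 = true := by
            rw [PySem.Dict.contains_eq_decide_mem_keys, hkeys3]
            simp [hst]
          have hval : dgs.getD k.2.2 0 = (l.count (k.1, k.2.1, k.2.2) : Int) := by
            apply PySem.Dict.getD_of_mem_items
            · rw [hdgs]
              unfold stList
              exact List.mem_map.mpr ⟨k.2.2, (PySem.List.mem_dedup _ _).mpr hst, rfl⟩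
            · exact hnd3
          have hstep : stepK d k =
              d.insert k.1 (dg.insert k.2.1 (dgs.insert k.2.2 (dgs.getD k.2.2 0 + 1))) := by
            unfold stepK
            rw [if_pos hcont, ← hdgdef, if_pos hcont2, ← hdgsdef, if_pos hcont3]
          rw [hstep, htop, conv1_insert_of_contains d k.1 _ hcont, IH]
          unfold pvCanon
          rw [List.map_map]
          apply List.map_congr_left
          intro g' hg'
          by_cases hgg : g' = k.1
          · subst hgg
            simp only [Function.comp_def, beq_self_eq_true, if_true]
            refine Prod.ext rfl ?_
            show conv2 (dg.insert k.2.1 (dgs.insert k.2.2 (dgs.getD k.2.2 0 + 1))) = spList (l ++ [k]) k.1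
            rw [conv2_insert_of_contains dg k.2.1 _ hcont2, hdg, spList_hit_old l k hsp]
            apply List.map_congr_left
            intro p hp
            by_cases hps : p.1 = k.2.1
            · simp only [hps, beq_self_eq_true, if_true]
              refine Prod.ext (by simp) ?_
              show (dgs.insert k.2.2 (dgs.getD k.2.2 0 + 1)).items = stList (l ++ [k]) k.1 k.2.1
              rw [PySem.Dict.items_insert_of_contains dgs _ hcont3, hdgs, stList_hit_old l k hst, hval]
              unfold stList
              rw [List.map_map, List.map_map]
              apply List.map_congr_left
              intro st hstm
              by_cases hss : st = k.2.2
              · simp [hss]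
              · simp [hss]
            · simp [hps]
          · simp only [Function.comp_def, beq_iff_eq, hgg, if_false]
            refine Prod.ext rfl ?_
            show spList l g' = spList (l ++ [k]) g'
            rw [spList_stable l k g' (by tauto)]
        · -- strain new
          have hcont3 : dgs.contains k.2.2 = false := by
            rw [PySem.Dict.contains_eq_decide_mem_keys, hkeys3]
            simp [hst]
          have hstep : stepK d k = d.insert k.1 (dg.insert k.2.1 (dgs.insert k.2.2 1)) := by
            unfold stepK
            rw [if_pos hcont, ← hdgdef, if_pos hcont2, ← hdgsdef, if_neg (by simp [hcont3])]
          rw [hstep, htop, conv1_insert_of_contains d k.1 _ hcont, IH]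
          unfold pvCanon
          rw [List.map_map]
          apply List.map_congr_left
          intro g' hg'
          by_cases hgg : g' = k.1
          · subst hgg
            simp only [Function.comp_def, beq_self_eq_true, if_true]
            refine Prod.ext rfl ?_
            show conv2 (dg.insert k.2.1 (dgs.insert k.2.2 1)) = spList (l ++ [k]) k.1
            rw [conv2_insert_of_contains dg k.2.1 _ hcont2, hdg, spList_hit_old l k hsp]
            apply List.map_congr_left
            intro p hp
            by_cases hps : p.1 = k.2.1
            · simp only [hps, beq_self_eq_true, if_true]
              refine Prod.ext (by simp) ?_
              show (dgs.insert k.2.2 1).items = stList (l ++ [k]) k.1 k.2.1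
              rw [PySem.Dict.items_insert_of_not_contains dgs _ hcont3, hdgs, stList_hit_new l k hst]
            · simp [hps]
          · simp only [Function.comp_def, beq_iff_eq, hgg, if_false]
            refine Prod.ext rfl ?_
            show spList l g' = spList (l ++ [k]) g'
            rw [spList_stable l k g' (by tauto)]
      · -- species new
        have hcont2 : dg.contains k.2.1 = false := by
          rw [PySem.Dict.contains_eq_decide_mem_keys, hkeys2]
          simp [hsp]
        have hstep : stepK d k =
            d.insert k.1 (dg.insert k.2.1 (PySem.Dict.ofList [(k.2.2, (1 : Int))])) := by
          unfold stepK
          rw [if_pos hcont, ← hdgdef, if_neg (by simp [hcont2])]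
        rw [hstep, htop, conv1_insert_of_contains d k.1 _ hcont, IH]
        unfold pvCanon
        rw [List.map_map]
        apply List.map_congr_left
        intro g' hg'
        by_cases hgg : g' = k.1
        · subst hgg
          simp only [Function.comp_def, beq_self_eq_true, if_true]
          refine Prod.ext rfl ?_
          show conv2 (dg.insert k.2.1 (PySem.Dict.ofList [(k.2.2, (1 : Int))])) = spList (l ++ [k]) k.1
          rw [conv2_insert_of_not_contains dg k.2.1 _ hcont2, hdg, spList_hit_new l k hsp]
          rfl
        · simp only [Function.comp_def, beq_iff_eq, hgg, if_false]
          refine Prod.ext rfl ?_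
          show spList l g' = spList (l ++ [k]) g'
          rw [spList_stable l k g' (by tauto)]
    · -- genus new
      have hcont : d.contains k.1 = false := by
        rw [PySem.Dict.contains_eq_decide_mem_keys, hkeys]
        simp [hg]
      have hfil : l.filter (fun k' => k'.1 == k.1) = [] := by
        rw [List.filter_eq_nil_iff]
        intro k' hk' hb
        simp only [beq_iff_eq] at hb
        exact hg (List.mem_map.mpr ⟨k', hk', hb⟩)
      have hspnil : spList l k.1 = [] := by
        unfold spList
        rw [hfil]
        rfl
      have hstep : stepK d k =
          d.insert k.1 (PySem.Dict.ofList [(k.2.1, PySem.Dict.ofList [(k.2.2, (1 : Int))])]) := by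
        unfold stepK
        rw [if_neg (by simp [hcont])]
      rw [hstep, conv1_insert_of_not_contains d k.1 _ hcont, IH]
      unfold pvCanon
      rw [List.map_append]
      simp only [List.map_cons, List.map_nil]
      rw [dedup_snoc, if_neg hg, List.map_append]
      congr 1
      · apply List.map_congr_left
        intro g' hg'
        have : k.1 ≠ g' := by
          intro he
          exact hg (he ▸ (PySem.List.mem_dedup _ _).mp hg')
        rw [spList_stable l k g' this]
      · simp only [List.map_cons, List.map_nil]
        have hspk : k.2.1 ∉ (l.filter (fun k' => k'.1 == k.1)).map (fun k' => k'.2.1) := by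
          rw [hfil]; simp
        rw [spList_hit_new l k hspk, hspnil]
        rfl

-- ===== VERDICT (by name: the statement is the Claim_ definition above) =====
theorem Genome_counter_spec : Claim_equal_Genome_counter := by
  intro hits _ _
  unfold Spec_Genome_counter Genome_counter Genome_counter_alt
  have h1 : hits.foldl GCstep PySem.Dict.empty = (hits.map pvKey).foldl stepK PySem.Dict.empty := by
    rw [List.foldl_map]; rfl
  rw [h1]
  exact main_inv (hits.map pvKey)
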